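-- pv_equiv track=rewrite | github.com/semicontinuity/datatools | datatools/analysis/text/text_classifier.py | pack_pattern
-- ===== SOURCE A (Python) =====
-- from typing import Tuple, Iterable, Iterator, Set, Dict, List, Hashable, Any, Sequence, Callable
--
-- def pack_pattern(in_pattern: Tuple[str, ...], lines: Sequence[str], wildcard = None) -> Tuple[str, ...]:
--     if len(lines) == 1:
--         return tuple(lines[0])
--
--     # collapse successive wildcards and text
--     out_pattern = []
--     text = ''
--     in_wildcard = False
--
--     for token in in_pattern:
--         if token is None:   # wildcard token
--             if in_wildcard:
--                 pass
--             else: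
--                 in_wildcard = True
--                 if text != '':
--                     out_pattern.append(text)
--                 text = ''
--         else:               # text token
--             if in_wildcard:
--                 out_pattern.append(None)
--                 in_wildcard = False
--             text += token
--
--     if text != '':
--         out_pattern.append(text)
--     if in_wildcard:
--         out_pattern.append(wildcard)
--
--     return tuple(out_pattern)
-- ===== SOURCE B (Python) =====
-- def pack_pattern(in_pattern, lines, wildcard=None):
--     if len(lines) == 1:
--         return tuple(lines[0])
--     # scan run by run with an index instead of a token-by-token state machine
--     out = []
--     i, n = 0, len(in_pattern)
--     while i < n:
--         if in_pattern[i] is None: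
--             while i < n and in_pattern[i] is None:
--                 i += 1
--             out.append(wildcard if i == n else None)
--         else:
--             j = i
--             while j < n and in_pattern[j] is not None:
--                 j += 1
--             text = ''.join(in_pattern[i:j])
--             if text:
--                 out.append(text)
--             i = j
--     return tuple(out)
-- ===== Notes on version B (the rewrite author's own statement) =====
-- stated objective: alternative
-- what changed: Replaces A's token-by-token state machine (out/text/in_wildcard flags) with an index-based run scanner that consumes whole wildcard runs and whole text runs at once, joining each text run in one step and deciding the trailing-wildcard case by whether the run reaches the end.
import Mathlib
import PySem

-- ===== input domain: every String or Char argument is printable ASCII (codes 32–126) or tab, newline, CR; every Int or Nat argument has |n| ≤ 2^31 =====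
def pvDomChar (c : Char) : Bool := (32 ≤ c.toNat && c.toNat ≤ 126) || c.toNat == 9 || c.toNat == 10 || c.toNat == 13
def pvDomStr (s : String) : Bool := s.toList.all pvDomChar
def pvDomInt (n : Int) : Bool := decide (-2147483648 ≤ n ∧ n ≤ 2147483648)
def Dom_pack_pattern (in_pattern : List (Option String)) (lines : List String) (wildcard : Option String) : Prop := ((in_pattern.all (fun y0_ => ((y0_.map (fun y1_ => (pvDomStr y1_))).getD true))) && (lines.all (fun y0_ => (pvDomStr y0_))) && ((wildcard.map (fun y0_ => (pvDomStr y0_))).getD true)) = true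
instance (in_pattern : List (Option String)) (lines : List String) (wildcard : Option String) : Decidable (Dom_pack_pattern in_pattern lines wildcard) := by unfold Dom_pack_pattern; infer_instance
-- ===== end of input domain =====

-- B replaces A's token-by-token state machine with a run scanner (alternative decomposition, same cost).
-- ===== PORT A =====
-- one loop step of A: state = (out_pattern, text, in_wildcard)
def stepA (s : List (Option String) × String × Bool) (token : Option String) :
    List (Option String) × String × Bool :=
  match token with
  | none => if s.2.2 then s
            else ((if s.2.1 ≠ "" then s.1 ++ [some s.2.1] else s.1), "", true)
  | some t => ((if s.2.2 then s.1 ++ [none] else s.1), s.2.1 ++ t, false)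

-- A's two trailing appends after the loop
def finishA (wildcard : Option String) (s : List (Option String) × String × Bool) :
    List (Option String) :=
  (if s.2.1 ≠ "" then s.1 ++ [some s.2.1] else s.1) ++ (if s.2.2 then [wildcard] else [])

def pack_pattern (in_pattern : List (Option String)) (lines : List String) (wildcard : Option String) : List (Option String) :=
  if lines.length == 1 then
    -- tuple(lines[0]) : the string's characters as one-character strings
    (lines.headD "").toList.map (fun c => some (String.singleton c))
  else
    finishA wildcard (List.foldl stepA ([], "", false) in_pattern)

-- ===== PORT B =====
-- run scanner: consume a whole wildcard run or a whole text run per step (B's while-loops over runs)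
def packRuns (wildcard : Option String) : List (Option String) → List (Option String)
  | [] => []
  | none :: rest =>
      let rest' := rest.dropWhile (fun t => t.isNone)
      (if rest' = [] then wildcard else none) :: packRuns wildcard rest'
  | some s :: rest =>
      let text := s ++ String.join ((rest.takeWhile (fun t => t.isSome)).filterMap id)
      let rest' := rest.dropWhile (fun t => t.isSome)
      (if text = "" then [] else [some text]) ++ packRuns wildcard rest'
termination_by l => l.length
decreasing_by
  · exact Nat.lt_succ_of_le (List.length_dropWhile_le _ _)
  · exact Nat.lt_succ_of_le (List.length_dropWhile_le _ _)

def pack_pattern_alt (in_pattern : List (Option String)) (lines : List String) (wildcard : Option String) : List (Option String) :=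
  if lines.length == 1 then
    (lines.headD "").toList.map (fun c => some (String.singleton c))
  else
    packRuns wildcard in_pattern

-- ===== PRECONDITION & SPEC =====
def Spec_pack_pattern (in_pattern : List (Option String)) (lines : List String) (wildcard : Option String) (out : List (Option String)) : Prop := out = pack_pattern_alt in_pattern lines wildcard
instance (in_pattern : List (Option String)) (lines : List String) (wildcard : Option String) (out : List (Option String)) : Decidable (Spec_pack_pattern in_pattern lines wildcard out) := by unfold Spec_pack_pattern; infer_instance

-- ===== CLAIM (what is proved, stated in full; the proofs are below) =====
def Claim_equal_pack_pattern : Prop := ∀ (in_pattern : List (Option String)) (lines : List String) (wildcard : Option String), Dom_pack_pattern in_pattern lines wildcard → Spec_pack_pattern in_pattern lines wildcard (pack_pattern in_pattern lines wildcard)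

-- ===== LEMMAS AND PROOFS =====

lemma packRuns_nil (wc : Option String) : packRuns wc [] = [] := by
  rw [packRuns]

lemma packRuns_some (wc : Option String) (s : String) (rest : List (Option String)) :
    packRuns wc (some s :: rest) =
      (if s ++ String.join ((rest.takeWhile (fun t => t.isSome)).filterMap id) = "" then []
        else [some (s ++ String.join ((rest.takeWhile (fun t => t.isSome)).filterMap id))]) ++
        packRuns wc (rest.dropWhile (fun t => t.isSome)) := by
  rw [packRuns]

lemma packRuns_none (wc : Option String) (rest : List (Option String)) :
    packRuns wc (none :: rest) =
      (if rest.dropWhile (fun t => t.isNone) = [] then wc else none) ::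
        packRuns wc (rest.dropWhile (fun t => t.isNone)) := by
  rw [packRuns]

lemma str_foldl_append (xs : List String) (a : String) :
    List.foldl (fun r s => r ++ s) a xs = a ++ List.foldl (fun r s => r ++ s) "" xs := by
  induction xs generalizing a with
  | nil => simp
  | cons x xs ih =>
    simp only [List.foldl_cons]
    rw [ih, ih ("" ++ x)]
    simp [String.append_assoc]

lemma join_cons (s : String) (xs : List String) :
    String.join (s :: xs) = s ++ String.join xs := by
  simp only [String.join, List.foldl_cons]
  rw [str_foldl_append]
  simp

-- stepA only appends to the out_pattern component
lemma stepA_out (out : List (Option String)) (t : String) (w : Bool) (tok : Option String) :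
    stepA (out, t, w) tok =
      (out ++ (stepA ([], t, w) tok).1, (stepA ([], t, w) tok).2) := by
  cases tok <;> simp only [stepA] <;> split_ifs <;> simp_all

-- so does the whole loop
lemma foldl_stepA_out (l : List (Option String)) (out : List (Option String)) (t : String) (w : Bool) :
    List.foldl stepA (out, t, w) l =
      (out ++ (List.foldl stepA ([], t, w) l).1, (List.foldl stepA ([], t, w) l).2) := by
  induction l generalizing out t w with
  | nil => simp
  | cons tok rest ih =>
    simp only [List.foldl_cons]
    rw [stepA_out]
    rcases hX : stepA ([], t, w) tok with ⟨o1, t1, w1⟩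
    rw [ih, ih o1]
    simp [List.append_assoc]

lemma finishA_out (wc : Option String) (l : List (Option String)) (out : List (Option String)) (t : String) (w : Bool) :
    finishA wc (List.foldl stepA (out, t, w) l) =
      out ++ finishA wc (List.foldl stepA ([], t, w) l) := by
  rw [foldl_stepA_out]
  unfold finishA
  split_ifs <;> simp

-- the main correspondence: A's loop from state ([], t, false) behaves like B's run
-- scanner on (some t :: l), and from ([], "", true) like on (none :: l)
lemma mainA (wc : Option String) (l : List (Option String)) :
    (∀ t, finishA wc (List.foldl stepA ([], t, false) l) = packRuns wc (some t :: l)) ∧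
      (finishA wc (List.foldl stepA ([], "", true) l) = packRuns wc (none :: l)) := by
  induction l with
  | nil =>
    constructor
    · intro t
      simp only [List.foldl_nil, finishA]
      rw [packRuns_some]
      simp only [List.takeWhile_nil, List.dropWhile_nil, List.filterMap_nil, packRuns_nil]
      have : String.join ([] : List String) = "" := by simp [String.join]
      rw [this]
      split_ifs <;> simp_all
    · simp only [List.foldl_nil, finishA]
      rw [packRuns_none]
      simp [packRuns_nil]
  | cons tok rest ih =>
    obtain ⟨ihF, ihT⟩ := ih
    constructor
    · intro t
      cases tok with
      | some s =>
        have h1 : List.foldl stepA ([], t, false) (some s :: rest)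
            = List.foldl stepA ([], t ++ s, false) rest := by
          simp [stepA]
        rw [h1, ihF]
        have ht : (some s :: rest).takeWhile (fun t => t.isSome)
            = some s :: rest.takeWhile (fun t => t.isSome) := by
          simp
        have hd : (some s :: rest).dropWhile (fun t => t.isSome)
            = rest.dropWhile (fun t => t.isSome) := by
          simp
        rw [packRuns_some, packRuns_some, ht, hd]
        simp only [List.filterMap_cons, id, join_cons, ← String.append_assoc]
      | none =>
        have h1 : List.foldl stepA ([], t, false) (none :: rest)
            = List.foldl stepA ((if t ≠ "" then [some t] else []), "", true) rest := by
          simp only [List.foldl_cons, stepA]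
          split_ifs <;> simp_all
        rw [h1, finishA_out, ihT, packRuns_some]
        have ht : (none :: rest).takeWhile (fun t => t.isSome) = [] := by
          simp
        have hd : (none :: rest).dropWhile (fun t => t.isSome) = none :: rest := by
          simp
        rw [ht, hd]
        simp only [List.filterMap_nil]
        have : String.join ([] : List String) = "" := by simp [String.join]
        rw [this]
        have hT : t ++ "" = t := by simp
        rw [hT]
        split_ifs <;> simp_all
    · cases tok with
      | some s =>
        have h1 : List.foldl stepA ([], "", true) (some s :: rest)
            = List.foldl stepA ([none], s, false) rest := by
          simp [stepA]
        rw [h1, finishA_out, ihF, packRuns_none]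
        have hd : (some s :: rest).dropWhile (fun t => t.isNone) = some s :: rest := by
          simp
        rw [hd]
        simp
      | none =>
        have h1 : List.foldl stepA ([], "", true) (none :: rest)
            = List.foldl stepA ([], "", true) rest := by
          simp [stepA]
        rw [h1, ihT, packRuns_none, packRuns_none]
        have hd : (none :: rest).dropWhile (fun t => t.isNone)
            = rest.dropWhile (fun t => t.isNone) := by
          simp
        rw [hd]

-- starting from an empty pending text is the same as never having had one
lemma packRuns_empty_text (wc : Option String) (l : List (Option String)) :
    packRuns wc (some "" :: l) = packRuns wc l := by
  cases l with
  | nil =>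
    rw [packRuns_some]
    simp [packRuns_nil, String.join]
  | cons tok rest =>
    cases tok with
    | some s =>
      have ht : (some s :: rest).takeWhile (fun t => t.isSome)
          = some s :: rest.takeWhile (fun t => t.isSome) := by
        simp
      have hd : (some s :: rest).dropWhile (fun t => t.isSome)
          = rest.dropWhile (fun t => t.isSome) := by
        simp
      rw [packRuns_some, packRuns_some, ht, hd]
      simp only [List.filterMap_cons, id, join_cons, ← String.append_assoc]
      simp
    | none =>
      rw [packRuns_some]
      have ht : (none :: rest).takeWhile (fun t => t.isSome) = [] := by
        simp
      have hd : (none :: rest).dropWhile (fun t => t.isSome) = none :: rest := by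
        simp
      rw [ht, hd]
      simp [String.join]

-- ===== VERDICT (by name: the statement is the Claim_ definition above) =====
theorem pack_pattern_spec : Claim_equal_pack_pattern := by
  intro in_pattern lines wildcard _
  unfold Spec_pack_pattern pack_pattern pack_pattern_alt
  split_ifs
  · rfl
  · rw [(mainA wildcard in_pattern).1 "", packRuns_empty_text]
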